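-- pv_equiv track=rewrite | github.com/Quatrixx/AoC_21 | day3_binary_diagnostic/binary_diagnostic.py | get_least_common_bits
-- ===== SOURCE A (Python) =====
-- def get_most_common_bits(bit_lists):
--     mcb = ""
--     for bit_list in bit_lists:
--         if bit_list.count(1) > bit_list.count(0):
--             mcb += '1'
--         elif bit_list.count(1) < bit_list.count(0):
--             mcb += '0'
--         else:
--             mcb += '2'
--     return mcb
--
-- def get_least_common_bits(bit_lists):
--     lcb = get_most_common_bits(bit_lists)
--     trans = []
--     trans.append(lcb.maketrans('0', '3'))
--     trans.append(lcb.maketrans('1', '0'))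
--     trans.append(lcb.maketrans('3', '1'))
--     for t in trans:
--         lcb = lcb.translate(t)
--     return lcb
-- ===== SOURCE B (Python) =====
-- def get_least_common_bits(bit_lists):
--     def bit(bit_list):
--         ones = bit_list.count(1)
--         zeros = bit_list.count(0)
--         return '0' if ones > zeros else '1' if ones < zeros else '2'
--     return ''.join(bit(bit_list) for bit_list in bit_lists)
-- ===== Notes on version B (the rewrite author's own statement) =====
-- stated objective: simpler
-- what changed: Replaces A's two phases (build the most-common string, then invert it with three chained str.translate passes) by one direct pass emitting the least-common bit per position via join over a generator.
import Mathlib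
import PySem

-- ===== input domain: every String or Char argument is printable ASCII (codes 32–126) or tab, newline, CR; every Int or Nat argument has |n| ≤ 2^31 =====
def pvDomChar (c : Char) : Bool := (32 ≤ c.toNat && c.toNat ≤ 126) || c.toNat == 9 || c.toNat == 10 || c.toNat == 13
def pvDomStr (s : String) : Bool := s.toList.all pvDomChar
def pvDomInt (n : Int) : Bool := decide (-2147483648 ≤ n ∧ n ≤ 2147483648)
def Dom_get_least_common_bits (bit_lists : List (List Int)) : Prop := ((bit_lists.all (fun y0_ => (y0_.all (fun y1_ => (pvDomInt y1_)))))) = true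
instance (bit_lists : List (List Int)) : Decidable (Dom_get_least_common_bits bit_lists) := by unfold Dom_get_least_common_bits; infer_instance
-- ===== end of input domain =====

-- B replaces A's two phases (most-common string + three chained translate inversions) by one direct pass emitting the least-common bit per position; objective: simpler.


-- ===== PORT A =====
-- mcb building loop of get_most_common_bits, over List Char
def pvMcb (bit_lists : List (List Int)) : List Char :=
  bit_lists.foldl (fun mcb bit_list =>
    if PySem.List.count bit_list 1 > PySem.List.count bit_list 0 then mcb ++ ['1']
    else if PySem.List.count bit_list 1 < PySem.List.count bit_list 0 then mcb ++ ['0']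
    else mcb ++ ['2']) []

-- str.maketrans/str.translate with a single-char table: exact, replaces src by dst
def pvTranslate (src dst : Char) (s : List Char) : List Char :=
  s.map (fun c => if c = src then dst else c)

def get_least_common_bits (bit_lists : List (List Int)) : String :=
  String.ofList ([('0', '3'), ('1', '0'), ('3', '1')].foldl
    (fun lcb t => pvTranslate t.1 t.2 lcb) (pvMcb bit_lists))

-- ===== PORT B =====
-- one char per bit_list, directly the least-common bit ('2' on ties)
def pvLcbChar (bit_list : List Int) : Char :=
  if PySem.List.count bit_list 1 > PySem.List.count bit_list 0 then '0'
  else if PySem.List.count bit_list 1 < PySem.List.count bit_list 0 then '1'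
  else '2'

def get_least_common_bits_alt (bit_lists : List (List Int)) : String :=
  String.ofList (bit_lists.map pvLcbChar)

-- ===== PRECONDITION & SPEC =====
def Spec_get_least_common_bits (bit_lists : List (List Int)) (out : String) : Prop := out = get_least_common_bits_alt bit_lists
instance (bit_lists : List (List Int)) (out : String) : Decidable (Spec_get_least_common_bits bit_lists out) := by unfold Spec_get_least_common_bits; infer_instance

-- ===== CLAIM (what is proved, stated in full; the proofs are below) =====
def Claim_equal_get_least_common_bits : Prop := ∀ (bit_lists : List (List Int)), Dom_get_least_common_bits bit_lists → Spec_get_least_common_bits bit_lists (get_least_common_bits bit_lists)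

-- ===== LEMMAS AND PROOFS =====

-- ===== VERDICT (by name: the statement is the Claim_ definition above) =====
theorem pvMcb_eq_map (bit_lists : List (List Int)) :
    pvMcb bit_lists = bit_lists.map (fun bit_list =>
      if PySem.List.count bit_list 1 > PySem.List.count bit_list 0 then '1'
      else if PySem.List.count bit_list 1 < PySem.List.count bit_list 0 then '0'
      else '2') := by
  unfold pvMcb
  have hf : (fun (mcb : List Char) (bit_list : List Int) =>
      if PySem.List.count bit_list 1 > PySem.List.count bit_list 0 then mcb ++ ['1']
      else if PySem.List.count bit_list 1 < PySem.List.count bit_list 0 then mcb ++ ['0']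
      else mcb ++ ['2'])
      = (fun (acc : List Char) (bit_list : List Int) => acc ++
        [if PySem.List.count bit_list 1 > PySem.List.count bit_list 0 then '1'
         else if PySem.List.count bit_list 1 < PySem.List.count bit_list 0 then '0'
         else '2']) := by
    funext acc bl
    split_ifs <;> rfl
  rw [hf, PySem.List.foldl_append_singleton_eq_map, List.nil_append]

theorem get_least_common_bits_spec : Claim_equal_get_least_common_bits := by
  intro bit_lists _
  unfold Spec_get_least_common_bits get_least_common_bits get_least_common_bits_alt
  simp only [List.foldl_cons, List.foldl_nil, pvMcb_eq_map, pvTranslate, List.map_map]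
  congr 1
  apply List.map_congr_left
  intro bl _
  simp only [Function.comp, pvLcbChar]
  split_ifs <;> simp_all
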